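-- pv_equiv track=rewrite | github.com/handsomeko/yt-dlp-sub | workers/monitor.py | _filter_new_videos
-- ===== SOURCE A (Python) =====
-- from typing import Any, Dict, List, Optional, Tuple
--
-- def _filter_new_videos(
--
--     videos: List[Dict[str, Any]],
--     last_video_id: Optional[str]
-- ) -> List[Dict[str, Any]]:
--     """
--     Filter videos to find only new ones since last check.
--
--     Args:
--         videos: List of video dictionaries from RSS feed
--         last_video_id: ID of the last processed video for this channel
--
--     Returns:
--         List of new video dictionaries (newest first)
--     """
--     if not last_video_id:
--         # No previous videos, all are new
--         return videos
--
--     # Find the index of the last known video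
--     new_videos = []
--     for video in videos:
--         if video["video_id"] == last_video_id:
--             # Found the last known video, stop here
--             break
--         new_videos.append(video)
--
--     return new_videos
-- ===== SOURCE B (Python) =====
-- def _filter_new_videos(videos, last_video_id):
--     """Locate the last known video once, then slice; same result as the accumulate-until-break loop."""
--     if not last_video_id:
--         return videos
--     idx = next((i for i, v in enumerate(videos) if v["video_id"] == last_video_id), None)
--     return videos if idx is None else videos[:idx]
-- ===== Notes on version B (the rewrite author's own statement) =====
-- stated objective: simpler
-- what changed: Replaces the accumulate-until-break loop with locate-the-cut-index-once (next over enumerate) followed by a single slice.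
import Mathlib
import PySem

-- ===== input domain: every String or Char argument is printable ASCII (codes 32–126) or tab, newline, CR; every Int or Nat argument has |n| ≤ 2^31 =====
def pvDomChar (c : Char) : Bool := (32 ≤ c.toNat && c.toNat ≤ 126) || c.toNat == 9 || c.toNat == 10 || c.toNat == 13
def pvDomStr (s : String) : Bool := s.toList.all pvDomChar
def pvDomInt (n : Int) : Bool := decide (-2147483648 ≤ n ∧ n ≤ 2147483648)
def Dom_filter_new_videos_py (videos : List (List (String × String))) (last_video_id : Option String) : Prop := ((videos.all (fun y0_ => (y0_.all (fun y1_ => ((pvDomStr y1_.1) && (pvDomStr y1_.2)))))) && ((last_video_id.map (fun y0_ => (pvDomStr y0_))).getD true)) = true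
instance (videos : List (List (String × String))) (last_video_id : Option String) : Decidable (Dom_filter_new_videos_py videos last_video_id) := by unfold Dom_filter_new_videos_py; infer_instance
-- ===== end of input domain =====

-- B locates the cut index once and slices, instead of A's accumulate-until-break loop (simpler decomposition, same O(n) cost).


-- ===== PORT A =====
-- the 'for video in videos: … break' loop of A, with the accumulator made implicit by
-- building the result front-to-back; video["video_id"] is PySem.Dict.get? (none = KeyError, excluded by Pre_; value there is arbitrary)
def pvLoopA (last : String) : List (List (String × String)) → List (List (String × String))
  | [] => []
  | v :: rest =>
    match (PySem.Dict.mk v).get? "video_id" with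
    | some x => if x = last then [] else v :: pvLoopA last rest
    | none => []

def filter_new_videos_py (videos : List (List (String × String))) (last_video_id : Option String) : List (List (String × String)) :=
  match last_video_id with
  | none => videos
  | some s => if s = "" then videos else pvLoopA s videos

-- ===== PORT B =====
def filter_new_videos_py_alt (videos : List (List (String × String))) (last_video_id : Option String) : List (List (String × String)) :=
  match last_video_id with
  | none => videos
  | some s =>
    if s = "" then videos else
      match videos.findIdx? (fun v => (PySem.Dict.mk v).get? "video_id" == some s) with
      | some i => videos.take i
      | none => videos

-- ===== PRECONDITION & SPEC =====
-- Pre_ excludes exactly the inputs where A raises KeyError: a truthy last_video_id and some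
-- video lacking the "video_id" key while no earlier video matched last_video_id.
def Pre_filter_new_videos_py (videos : List (List (String × String))) (last_video_id : Option String) : Prop :=
  last_video_id = none ∨ last_video_id = some "" ∨
    ∀ i < videos.length,
      (∀ j < i, (PySem.Dict.mk videos[j]!).get? "video_id" ≠ some (last_video_id.getD "")) →
      ((PySem.Dict.mk videos[i]!).get? "video_id").isSome = true
instance (videos : List (List (String × String))) (last_video_id : Option String) : Decidable (Pre_filter_new_videos_py videos last_video_id) := by unfold Pre_filter_new_videos_py; infer_instance

def pvWitness_filter_new_videos_py : (List (List (String × String))) × Option String :=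
  ([[("video_id", "a")], [("video_id", "b")]], some "b")

def Spec_filter_new_videos_py (videos : List (List (String × String))) (last_video_id : Option String) (out : List (List (String × String))) : Prop := out = filter_new_videos_py_alt videos last_video_id
instance (videos : List (List (String × String))) (last_video_id : Option String) (out : List (List (String × String))) : Decidable (Spec_filter_new_videos_py videos last_video_id out) := by unfold Spec_filter_new_videos_py; infer_instance

-- ===== CLAIM (what is proved, stated in full; the proofs are below) =====
def Claim_equal_filter_new_videos_py : Prop := ∀ (videos : List (List (String × String))) (last_video_id : Option String), Dom_filter_new_videos_py videos last_video_id → Pre_filter_new_videos_py videos last_video_id → Spec_filter_new_videos_py videos last_video_id (filter_new_videos_py videos last_video_id)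

-- ===== LEMMAS AND PROOFS =====
-- loop-shaped restatement of Pre_'s key condition, used by the induction below
def pvKeysOk (last : String) : List (List (String × String)) → Bool
  | [] => true
  | v :: rest =>
    match (PySem.Dict.mk v).get? "video_id" with
    | some x => x == last || pvKeysOk last rest
    | none => false

lemma pvPre_to_keysOk (last : String) :
    ∀ (videos : List (List (String × String))),
      (∀ i < videos.length,
        (∀ j < i, (PySem.Dict.mk videos[j]!).get? "video_id" ≠ some last) →
        ((PySem.Dict.mk videos[i]!).get? "video_id").isSome = true) →
      pvKeysOk last videos = true := by
  intro videos
  induction videos with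
  | nil => intro _; rfl
  | cons v rest ih =>
    intro H
    have h0 : ((PySem.Dict.mk v).get? "video_id").isSome = true := by
      have := H 0 (by simp) (fun j hj => absurd hj (Nat.not_lt_zero j))
      simpa using this
    obtain ⟨x, hg⟩ := Option.isSome_iff_exists.mp h0
    by_cases hx : x = last
    · simp [pvKeysOk, hg, hx]
    · have hrest : pvKeysOk last rest = true := by
        apply ih
        intro i hi hpre
        have := H (i + 1) (by simpa using Nat.succ_lt_succ hi) ?_
        · simpa using this
        · intro j hj
          cases j with
          | zero => simp [hg, hx]
          | succ k =>
            have hk : k < i := by omega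
            simpa using hpre k hk
      simp [pvKeysOk, hg, hx, hrest]

lemma pvLoopA_eq_cut (last : String) (videos : List (List (String × String)))
    (h : pvKeysOk last videos = true) :
    pvLoopA last videos =
      (match videos.findIdx? (fun v => (PySem.Dict.mk v).get? "video_id" == some last) with
       | some i => videos.take i
       | none => videos) := by
  induction videos with
  | nil => simp [pvLoopA]
  | cons v rest ih =>
    simp only [pvKeysOk] at h
    cases hg : (PySem.Dict.mk v).get? "video_id" with
    | none => simp [hg] at h
    | some x =>
      rw [hg] at h
      simp only [pvLoopA, hg, List.findIdx?_cons]
      by_cases hx : x = last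
      · simp [hx]
      · have hx' : (x == last) = false := by simp [hx]
        have hrest : pvKeysOk last rest = true := by
          simpa [hx'] using h
        simp only [hx', if_neg hx, Bool.false_or] at h ⊢
        rw [ih hrest]
        cases hf : rest.findIdx? (fun v => (PySem.Dict.mk v).get? "video_id" == some last) with
        | none => simp [if_neg hx]
        | some i => simp [if_neg hx, List.take_succ_cons]

-- ===== VERDICT (by name: the statement is the Claim_ definition above) =====
theorem filter_new_videos_py_spec : Claim_equal_filter_new_videos_py := by
  intro videos last_video_id _ hpre
  unfold Spec_filter_new_videos_py filter_new_videos_py filter_new_videos_py_alt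
  cases last_video_id with
  | none => rfl
  | some s =>
    by_cases hs : s = ""
    · simp [hs]
    · simp only [if_neg hs]
      rcases hpre with h | h | h
      · simp at h
      · simp [hs] at h
      · exact pvLoopA_eq_cut s videos (pvPre_to_keysOk s videos (by simpa using h))
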